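-- pv_equiv track=rewrite | github.com/avd1729/Leet-code | 861. Score After Flipping Matrix.py | matrixScore
-- ===== SOURCE A (Python) =====
-- from typing import List
--
-- def matrixScore(grid: List[List[int]]) -> int:
--     m = len(grid)
--     n = len(grid[0])
--     for row in range(m):
--         if grid[row][0] == 0:
--             for col in range(n):
--                 grid[row][col] = 1 - grid[row][col]
--
--     for col in range(1, n):
--         num_bit_ones = 0
--         for row in range(m):
--             if grid[row][col] == 1:
--                 num_bit_ones += 1
--         if num_bit_ones < m - num_bit_ones:
--             for row in range(m):
--                 grid[row][col] = 1 - grid[row][col]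
--
--     score = 0
--     for col in range(n):
--         num_bit_ones = 0
--         for row in range(m):
--             if grid[row][col] == 1:
--                 num_bit_ones += 1
--
--         score += num_bit_ones * 2 ** (n-1 - col)
--
--     return score
-- ===== SOURCE B (Python) =====
-- def matrixScore(grid):
--     m = len(grid)
--     n = len(grid[0])
--     ones = [0] * n
--     zeros = [0] * n
--     for row in grid:
--         flip = row[0] == 0
--         vs = [1 - x if flip else x for x in row[:n]]
--         ones = [o + (v == 1) for o, v in zip(ones, vs)]
--         zeros = [z + (v == 0) for z, v in zip(zeros, vs)]
--     score = ones[0]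
--     for c in range(1, n):
--         score = 2 * score + (zeros[c] if 2 * ones[c] < m else ones[c])
--     return score
-- ===== Notes on version B (the rewrite author's own statement) =====
-- stated objective: alternative
-- what changed: B never flips or mutates anything: one row-major pass builds per-column one/zero counters with zipWith-style list additions (normalizing each row against its leading bit on the fly), then a Horner loop (score = 2*score + column contribution) replaces A's column-major flip-mutate-recount phases and its explicit 2**(n-1-c) powers.
import Mathlib
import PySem

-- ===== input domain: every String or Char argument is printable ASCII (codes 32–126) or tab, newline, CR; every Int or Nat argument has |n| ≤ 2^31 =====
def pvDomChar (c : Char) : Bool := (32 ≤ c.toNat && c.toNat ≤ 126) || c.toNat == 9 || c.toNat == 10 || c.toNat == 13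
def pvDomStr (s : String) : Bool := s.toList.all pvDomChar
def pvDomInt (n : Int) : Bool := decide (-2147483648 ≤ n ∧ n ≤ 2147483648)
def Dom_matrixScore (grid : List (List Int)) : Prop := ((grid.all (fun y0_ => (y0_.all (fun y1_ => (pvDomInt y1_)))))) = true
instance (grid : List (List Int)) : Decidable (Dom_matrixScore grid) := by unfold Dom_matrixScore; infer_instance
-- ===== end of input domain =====

-- B replaces A's flip-mutate-recount column phases by one non-mutating row-major counter pass
-- plus a Horner accumulation; A mutates its argument in place while B does not, so the
-- equivalence proved here is about the RETURN value only.

-- ===== PORT A =====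
-- inner loop 'for col in range(n): grid[row][col] = 1 - grid[row][col]' (flip the first n entries)
def pvFlipRow : List Int → Nat → List Int
  | row, 0 => row
  | [], _ + 1 => []
  | x :: xs, k + 1 => (1 - x) :: pvFlipRow xs k

-- 'num_bit_ones = 0; for row in range(m): if grid[row][col] == 1: num_bit_ones += 1'
def pvCountCol (g : List (List Int)) (c : Nat) : Int :=
  g.foldl (fun a row => if row.getD c 0 = 1 then a + 1 else a) 0

-- 'for row in range(m): grid[row][col] = 1 - grid[row][col]'
def pvFlipCol (g : List (List Int)) (c : Nat) : List (List Int) :=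
  g.map (fun row => row.set c (1 - row.getD c 0))

-- 'for col in range(1, n): …' (the column-flip loop)
def pvPhase2 (m : Int) (cs : List Nat) (g : List (List Int)) : List (List Int) :=
  cs.foldl (fun g c =>
    if pvCountCol g c < m - pvCountCol g c then pvFlipCol g c else g) g

def matrixScore (grid : List (List Int)) : Int :=
  let m := grid.length
  let n := (grid.headD []).length
  let g1 := grid.map (fun row => if row.getD 0 0 = 0 then pvFlipRow row n else row)
  let g2 := pvPhase2 (m : Int) (List.range' 1 (n - 1)) g1
  (List.range n).foldl (fun s c => s + pvCountCol g2 c * 2 ^ (n - 1 - c)) 0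

-- ===== PORT B =====
-- one row of B's counter pass: 'vs = [1 - x if flip else x for x in row[:n]]' and the two
-- zip-comprehension list updates
def pvAccRow (n : Nat) (oz : List Int × List Int) (row : List Int) : List Int × List Int :=
  let vs := (row.take n).map (fun x => if row.getD 0 0 = 0 then 1 - x else x)
  (List.zipWith (fun o v => o + if v = 1 then (1 : Int) else 0) oz.1 vs,
   List.zipWith (fun z v => z + if v = 0 then (1 : Int) else 0) oz.2 vs)

def matrixScore_alt (grid : List (List Int)) : Int :=
  let m := grid.length
  let n := (grid.headD []).length
  let oz := grid.foldl (pvAccRow n) (List.replicate n 0, List.replicate n 0)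
  (List.range' 1 (n - 1)).foldl
    (fun s c => 2 * s + (if 2 * oz.1.getD c 0 < (m : Int) then oz.2.getD c 0 else oz.1.getD c 0))
    (oz.1.getD 0 0)

-- ===== PRECONDITION & SPEC =====
-- Pre_ excludes exactly the inputs on which the Python A raises IndexError: the empty grid,
-- an empty first row, and grids with a row shorter than the first row.
def Pre_matrixScore (grid : List (List Int)) : Prop :=
  grid ≠ [] ∧ 1 ≤ (grid.headD []).length ∧ ∀ r ∈ grid, (grid.headD []).length ≤ r.length
instance (grid : List (List Int)) : Decidable (Pre_matrixScore grid) := by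
  unfold Pre_matrixScore; infer_instance

def pvWitness_matrixScore : List (List Int) := [[0,0,1,1],[1,0,1,0],[1,1,0,0]]

def Spec_matrixScore (grid : List (List Int)) (out : Int) : Prop := out = matrixScore_alt grid
instance (grid : List (List Int)) (out : Int) : Decidable (Spec_matrixScore grid out) := by
  unfold Spec_matrixScore; infer_instance

-- ===== CLAIM (what is proved, stated in full; the proofs are below) =====
def Claim_equal_matrixScore : Prop := ∀ (grid : List (List Int)), Dom_matrixScore grid → Pre_matrixScore grid → Spec_matrixScore grid (matrixScore grid)

-- ===== LEMMAS AND PROOFS =====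

-- counts over A's row-flipped matrix
def pvC1 (g : List (List Int)) (c : Nat) : Nat := g.countP (fun r => r.getD c 0 == 1)
def pvC0 (g : List (List Int)) (c : Nat) : Nat := g.countP (fun r => r.getD c 0 == 0)

-- counts over the raw grid, normalizing each row against its leading entry (B's view)
def pvN1 (g : List (List Int)) (c : Nat) : Nat :=
  g.countP (fun r => (if r.getD 0 0 = 0 then 1 - r.getD c 0 else r.getD c 0) == 1)
def pvN0 (g : List (List Int)) (c : Nat) : Nat :=
  g.countP (fun r => (if r.getD 0 0 = 0 then 1 - r.getD c 0 else r.getD c 0) == 0)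

lemma pvCountCol_eq (g : List (List Int)) (c : Nat) :
    pvCountCol g c = (pvC1 g c : Int) := by
  unfold pvCountCol pvC1
  simpa using PySem.List.foldl_count_if (fun r : List Int => r.getD c 0 == 1) g 0

lemma pvFlipRow_length (row : List Int) (k : Nat) : (pvFlipRow row k).length = row.length := by
  induction row generalizing k with
  | nil => cases k <;> simp [pvFlipRow]
  | cons x xs ih => cases k <;> simp [pvFlipRow, ih]

lemma pvFlipRow_getD_lt (row : List Int) (k c : Nat) (hc : c < k) (hr : c < row.length) :
    (pvFlipRow row k).getD c 0 = 1 - row.getD c 0 := by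
  induction row generalizing k c with
  | nil => simp at hr
  | cons x xs ih =>
    cases k with
    | zero => omega
    | succ k' =>
      cases c with
      | zero => simp [pvFlipRow]
      | succ c' =>
        simp only [pvFlipRow, List.getD_cons_succ]
        exact ih k' c' (by omega) (by simpa using hr)

lemma pvFlipCol_rows (n : Nat) (g : List (List Int)) (c : Nat)
    (h : ∀ r ∈ g, n ≤ r.length) : ∀ r ∈ pvFlipCol g c, n ≤ r.length := by
  intro r hr
  simp only [pvFlipCol, List.mem_map] at hr
  obtain ⟨r', hr', rfl⟩ := hr
  simpa using h r' hr'

lemma pvC1_flipCol_ne (g : List (List Int)) (c c' : Nat) (h : c' ≠ c) :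
    pvC1 (pvFlipCol g c) c' = pvC1 g c' ∧ pvC0 (pvFlipCol g c) c' = pvC0 g c' := by
  unfold pvC1 pvC0 pvFlipCol
  rw [List.countP_map, List.countP_map]
  constructor <;>
  · apply List.countP_congr
    intro r _
    simp [Function.comp, List.getD_eq_getElem?_getD, List.getElem?_set_ne (Ne.symm h)]

lemma pvC1_flipCol_eq (g : List (List Int)) (c : Nat) (h : ∀ r ∈ g, c < r.length) :
    pvC1 (pvFlipCol g c) c = pvC0 g c := by
  unfold pvC1 pvC0 pvFlipCol
  rw [List.countP_map]
  apply List.countP_congr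
  intro r hr
  have hc := h r hr
  simp only [Function.comp_apply, List.getD_eq_getElem?_getD, List.getElem?_set_self hc,
    Option.getD_some, beq_iff_eq]
  omega

lemma pvPhase2_C1 (m : Int) (n : Nat) :
    ∀ (cs : List Nat) (g : List (List Int)), (∀ r ∈ g, n ≤ r.length) →
      (∀ c ∈ cs, c < n) → cs.Nodup → ∀ c, c < n →
      pvC1 (pvPhase2 m cs g) c =
        if c ∈ cs ∧ 2 * (pvC1 g c : Int) < m then pvC0 g c else pvC1 g c := by
  intro cs
  induction cs with
  | nil => intro g _ _ _ c _; simp [pvPhase2]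
  | cons c0 cs ih =>
    intro g hlen hcs hnd c hc
    have hc0n : c0 < n := hcs c0 (by simp)
    have hstep : pvPhase2 m (c0 :: cs) g =
        pvPhase2 m cs (if pvCountCol g c0 < m - pvCountCol g c0 then pvFlipCol g c0 else g) := by
      simp [pvPhase2]
    set g' := if pvCountCol g c0 < m - pvCountCol g c0 then pvFlipCol g c0 else g with hg'
    have hlen' : ∀ r ∈ g', n ≤ r.length := by
      rw [hg']; split
      · exact pvFlipCol_rows n g c0 hlen
      · exact hlen
    have hrec := ih g' hlen' (fun x hx => hcs x (List.mem_cons_of_mem _ hx))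
      hnd.of_cons c hc
    rw [hstep, hrec]
    have hcond : (pvCountCol g c0 < m - pvCountCol g c0) ↔ (2 * (pvC1 g c0 : Int) < m) := by
      rw [pvCountCol_eq]; omega
    by_cases hcc0 : c = c0
    · subst hcc0
      have hnotin : c ∉ cs := (List.nodup_cons.mp hnd).1
      simp only [hnotin, false_and, if_false, List.mem_cons, true_or, true_and]
      rw [hg']
      split
      · rename_i hlt
        rw [pvC1_flipCol_eq g c (fun r hr => lt_of_lt_of_le hc (hlen r hr))]
        rw [if_pos (hcond.mp hlt)]
      · rename_i hlt
        rw [if_neg (fun h => hlt (hcond.mpr h))]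
    · have h1 : pvC1 g' c = pvC1 g c ∧ pvC0 g' c = pvC0 g c := by
        rw [hg']; split
        · exact pvC1_flipCol_ne g c0 c hcc0
        · exact ⟨rfl, rfl⟩
      rw [h1.1, h1.2]
      simp only [List.mem_cons, hcc0, false_or]

-- A's row-flipped matrix has, column by column, exactly B's normalized counts
lemma pvC1_g1 (grid : List (List Int)) (n c : Nat) (hc : c < n)
    (hlen : ∀ r ∈ grid, n ≤ r.length) :
    pvC1 (grid.map (fun row => if row.getD 0 0 = 0 then pvFlipRow row n else row)) c
      = pvN1 grid c ∧
    pvC0 (grid.map (fun row => if row.getD 0 0 = 0 then pvFlipRow row n else row)) c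
      = pvN0 grid c := by
  unfold pvC1 pvC0 pvN1 pvN0
  rw [List.countP_map, List.countP_map]
  constructor <;>
  · apply List.countP_congr
    intro r hr
    have hcl : c < r.length := lt_of_lt_of_le hc (hlen r hr)
    by_cases h0 : r.getD 0 0 = 0
    · simp only [Function.comp_apply, if_pos h0, pvFlipRow_getD_lt r n c hc hcl]
    · simp only [Function.comp_apply, if_neg h0]

-- the counter pass of B: after folding pvAccRow over g, slot c holds the normalized counts
lemma pvAcc_counts (n : Nat) :
    ∀ (g : List (List Int)) (ones zeros : List Int),
      ones.length = n → zeros.length = n → (∀ r ∈ g, n ≤ r.length) →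
      (g.foldl (pvAccRow n) (ones, zeros)).1.length = n ∧
      (g.foldl (pvAccRow n) (ones, zeros)).2.length = n ∧
      ∀ c, c < n →
        (g.foldl (pvAccRow n) (ones, zeros)).1.getD c 0 = ones.getD c 0 + (pvN1 g c : Int) ∧
        (g.foldl (pvAccRow n) (ones, zeros)).2.getD c 0 = zeros.getD c 0 + (pvN0 g c : Int) := by
  intro g
  induction g with
  | nil =>
    intro ones zeros h1 h2 _
    refine ⟨h1, h2, fun c _ => ?_⟩
    simp [pvN1, pvN0]
  | cons r g ih =>
    intro ones zeros h1 h2 hlen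
    have hrl : n ≤ r.length := hlen r (by simp)
    have hstep : (r :: g).foldl (pvAccRow n) (ones, zeros)
        = g.foldl (pvAccRow n) (pvAccRow n (ones, zeros) r) := by rfl
    have ho' : (pvAccRow n (ones, zeros) r).1.length = n := by
      simp only [pvAccRow, List.length_zipWith, List.length_map, List.length_take, h1]
      omega
    have hz' : (pvAccRow n (ones, zeros) r).2.length = n := by
      simp only [pvAccRow, List.length_zipWith, List.length_map, List.length_take, h2]
      omega
    have hrec := ih (pvAccRow n (ones, zeros) r).1 (pvAccRow n (ones, zeros) r).2 ho' hz'
      (fun r' hr' => hlen r' (List.mem_cons_of_mem _ hr'))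
    refine ⟨by rw [hstep]; exact hrec.1, by rw [hstep]; exact hrec.2.1, fun c hc => ?_⟩
    have hcr : c < r.length := lt_of_lt_of_le hc hrl
    have hget1 : (pvAccRow n (ones, zeros) r).1.getD c 0
        = ones.getD c 0 + (if (if r.getD 0 0 = 0 then 1 - r.getD c 0 else r.getD c 0) = 1
            then (1 : Int) else 0) := by
      have hcl : c < (pvAccRow n (ones, zeros) r).1.length := by omega
      simp only [pvAccRow] at hcl ⊢
      rw [List.getD_eq_getElem _ _ hcl, List.getElem_zipWith, List.getElem_map,
          List.getElem_take, List.getD_eq_getElem _ _ (by omega : c < ones.length),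
          List.getD_eq_getElem _ _ hcr]
    have hget2 : (pvAccRow n (ones, zeros) r).2.getD c 0
        = zeros.getD c 0 + (if (if r.getD 0 0 = 0 then 1 - r.getD c 0 else r.getD c 0) = 0
            then (1 : Int) else 0) := by
      have hcl : c < (pvAccRow n (ones, zeros) r).2.length := by omega
      simp only [pvAccRow] at hcl ⊢
      rw [List.getD_eq_getElem _ _ hcl, List.getElem_zipWith, List.getElem_map,
          List.getElem_take, List.getD_eq_getElem _ _ (by omega : c < zeros.length),
          List.getD_eq_getElem _ _ hcr]
    have hN1 : (pvN1 (r :: g) c : Int) =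
        (if (if r.getD 0 0 = 0 then 1 - r.getD c 0 else r.getD c 0) = 1 then (1:Int) else 0)
          + pvN1 g c := by
      unfold pvN1
      rw [List.countP_cons]
      by_cases h : (if r.getD 0 0 = 0 then 1 - r.getD c 0 else r.getD c 0) = 1 <;>
        · simp [h]
          push_cast
          ring
    have hN0 : (pvN0 (r :: g) c : Int) =
        (if (if r.getD 0 0 = 0 then 1 - r.getD c 0 else r.getD c 0) = 0 then (1:Int) else 0)
          + pvN0 g c := by
      unfold pvN0
      rw [List.countP_cons]
      by_cases h : (if r.getD 0 0 = 0 then 1 - r.getD c 0 else r.getD c 0) = 0 <;>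
        · simp [h]
          push_cast
          ring
    constructor
    · rw [hstep, (hrec.2.2 c hc).1, hget1, hN1]; ring
    · rw [hstep, (hrec.2.2 c hc).2, hget2, hN0]; ring

-- a left fold that only adds is the sum
lemma pvFoldl_range_add (g : Nat → Int) : ∀ (k : Nat),
    (List.range k).foldl (fun s c => s + g c) 0 = ∑ c ∈ Finset.range k, g c := by
  intro k
  induction k with
  | zero => simp
  | succ k ih => rw [List.range_succ, List.foldl_append, ih, Finset.sum_range_succ]; rfl

-- Horner evaluation of B equals the weighted sum
lemma pvHorner (f : Nat → Int) : ∀ (k : Nat),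
    (List.range' 1 k).foldl (fun s c => 2 * s + f c) (f 0)
      = ∑ c ∈ Finset.range (k + 1), f c * 2 ^ (k - c) := by
  intro k
  induction k with
  | zero => simp
  | succ k ih =>
    rw [List.range'_concat, List.foldl_append, ih]
    simp only [List.foldl_cons, List.foldl_nil, one_mul]
    rw [Finset.sum_range_succ (n := k + 1), Finset.mul_sum]
    have hcong : ∀ c ∈ Finset.range (k + 1), 2 * (f c * 2 ^ (k - c)) = f c * 2 ^ (k + 1 - c) := by
      intro c hc
      have hck : c ≤ k := by simpa [Nat.lt_succ_iff] using hc
      rw [show k + 1 - c = (k - c) + 1 by omega, pow_succ]; ring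
    rw [Finset.sum_congr rfl hcong]
    simp [Nat.add_comm]

-- ===== VERDICT (by name: the statement is the Claim_ definition above) =====
theorem matrixScore_spec : Claim_equal_matrixScore := by
  intro grid _hdom hpre
  obtain ⟨hne, hn1, hlen⟩ := hpre
  unfold Spec_matrixScore matrixScore matrixScore_alt
  simp only
  set n := (grid.headD []).length with hn
  set m := grid.length with hm
  set g1 := grid.map (fun row => if row.getD 0 0 = 0 then pvFlipRow row n else row) with hg1
  set g2 := pvPhase2 (m : Int) (List.range' 1 (n - 1)) g1 with hg2
  set oz := grid.foldl (pvAccRow n) (List.replicate n 0, List.replicate n 0) with hoz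
  set F : Nat → Int := fun c =>
    if 0 < c ∧ 2 * (pvN1 grid c : Int) < (m : Int) then (pvN0 grid c : Int)
    else (pvN1 grid c : Int) with hF
  have hlen1 : ∀ r ∈ g1, n ≤ r.length := by
    intro r hr
    rw [hg1] at hr
    simp only [List.mem_map] at hr
    obtain ⟨r', hr', rfl⟩ := hr
    have hr'l := hlen r' hr'
    split
    · rw [pvFlipRow_length]; exact hr'l
    · exact hr'l
  have hmem : ∀ c, (c ∈ List.range' 1 (n - 1)) ↔ (0 < c ∧ c < n) := by
    intro c; rw [List.mem_range'_1]; omega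
  -- A-side column count = F
  have hA : ∀ c, c < n → pvCountCol g2 c = F c := by
    intro c hc
    have h2 := pvPhase2_C1 (m : Int) n (List.range' 1 (n - 1)) g1 hlen1
      (fun x hx => ((hmem x).mp hx).2) (List.nodup_range' 1) c hc
    have hcg := pvC1_g1 grid n c hc hlen
    rw [pvCountCol_eq, hg2, h2, hcg.1, hcg.2]
    simp only [hF]
    by_cases hcond : 0 < c ∧ 2 * (pvN1 grid c : Int) < (m : Int)
    · rw [if_pos ⟨(hmem c).mpr ⟨hcond.1, hc⟩, hcond.2⟩, if_pos hcond]
    · rw [if_neg, if_neg hcond]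
      intro hcon
      exact hcond ⟨((hmem c).mp hcon.1).1, hcon.2⟩
  -- B-side counter slots
  have hcnt := pvAcc_counts n grid (List.replicate n 0) (List.replicate n 0)
    (by simp) (by simp) hlen
  have hones : ∀ c, c < n → oz.1.getD c 0 = (pvN1 grid c : Int) := by
    intro c hc
    have h := (hcnt.2.2 c hc).1
    rw [hoz]
    simpa using h
  have hzeros : ∀ c, c < n → oz.2.getD c 0 = (pvN0 grid c : Int) := by
    intro c hc
    have h := (hcnt.2.2 c hc).2
    rw [hoz]
    simpa using h
  -- rewrite both folds to folds of F
  have hAfold : (List.range n).foldl (fun s c => s + pvCountCol g2 c * 2 ^ (n - 1 - c)) 0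
      = (List.range n).foldl (fun s c => s + F c * 2 ^ (n - 1 - c)) 0 := by
    apply PySem.List.foldl_congr_mem
    intro s c hcmem
    rw [hA c (List.mem_range.mp hcmem)]
  have hBfold : (List.range' 1 (n - 1)).foldl
      (fun s c => 2 * s + (if 2 * oz.1.getD c 0 < (m : Int) then oz.2.getD c 0 else oz.1.getD c 0))
      (oz.1.getD 0 0)
      = (List.range' 1 (n - 1)).foldl (fun s c => 2 * s + F c) (F 0) := by
    have h0 : oz.1.getD 0 0 = F 0 := by
      rw [hones 0 (by omega)]
      simp [hF]
    rw [h0]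
    apply PySem.List.foldl_congr_mem
    intro s c hcmem
    obtain ⟨hc0, hcn⟩ := (hmem c).mp hcmem
    rw [hones c hcn, hzeros c hcn]
    simp [hF, hc0]
  rw [hAfold, hBfold, pvFoldl_range_add, pvHorner]
  have hnn : n - 1 + 1 = n := by omega
  rw [hnn]
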